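-- pv_equiv track=rewrite | github.com/sivatmam/CCPS109 | Problems/labs109.py | taxi_zum_zum
-- ===== SOURCE A (Python) =====
-- def taxi_zum_zum(moves):
--   totalheading = 0
--   posx = 0
--   posy = 0
--   for move in moves:
--     if move == "R":
--       totalheading += 90
--     elif move == "L":
--       totalheading -= 90
--     elif move == "F":
--       heading = totalheading % 360
--       if heading < 0:
--         heading = 360 - heading
--
--       if heading == 0:
--         posy += 1
--       elif heading == 90:
--         posx += 1
--       elif heading == 180:
--         posy -= 1
--       elif heading == 270:
--         posx -= 1
--
--   return (posx, posy)
-- ===== SOURCE B (Python) =====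
-- def taxi_zum_zum(moves):
--     dx, dy = 0, 1
--     posx = posy = 0
--     for move in moves:
--         if move == "R":
--             dx, dy = dy, -dx
--         elif move == "L":
--             dx, dy = -dy, dx
--         elif move == "F":
--             posx += dx
--             posy += dy
--     return (posx, posy)
-- ===== Notes on version B (the rewrite author's own statement) =====
-- stated objective: simpler
-- what changed: Replaces the integer heading (degrees) plus modulo-360 four-way dispatch with a unit direction vector (dx,dy) rotated in place, so 'F' is a single vector addition with no heading normalisation or case analysis.
import Mathlib
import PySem

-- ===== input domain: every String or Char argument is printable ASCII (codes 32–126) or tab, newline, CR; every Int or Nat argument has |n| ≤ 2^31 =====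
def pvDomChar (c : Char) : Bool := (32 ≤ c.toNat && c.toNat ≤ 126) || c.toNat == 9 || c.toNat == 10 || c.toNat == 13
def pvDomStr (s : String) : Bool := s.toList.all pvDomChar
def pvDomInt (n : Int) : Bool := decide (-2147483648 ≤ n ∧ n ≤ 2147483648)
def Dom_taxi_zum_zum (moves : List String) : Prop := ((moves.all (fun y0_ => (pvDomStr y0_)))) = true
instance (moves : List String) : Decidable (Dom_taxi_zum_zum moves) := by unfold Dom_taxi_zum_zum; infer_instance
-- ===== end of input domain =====

-- B replaces A's degree heading + modulo-360 dispatch with a unit direction vector rotated in place (objective: simpler).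

-- ===== PORT A =====
-- loop body of A: state = (totalheading, posx, posy)
def taxiStepA (st : Int × Int × Int) (move : String) : Int × Int × Int :=
  let (totalheading, posx, posy) := st
  if move = "R" then (totalheading + 90, posx, posy)
  else if move = "L" then (totalheading - 90, posx, posy)
  else if move = "F" then
    let heading0 := PySem.Int.mod totalheading 360
    let heading := if heading0 < 0 then 360 - heading0 else heading0
    if heading = 0 then (totalheading, posx, posy + 1)
    else if heading = 90 then (totalheading, posx + 1, posy)
    else if heading = 180 then (totalheading, posx, posy - 1)
    else if heading = 270 then (totalheading, posx - 1, posy)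
    else (totalheading, posx, posy)
  else (totalheading, posx, posy)

def taxi_zum_zum (moves : List String) : Int × Int :=
  let st := moves.foldl taxiStepA (0, 0, 0)
  (st.2.1, st.2.2)

-- ===== PORT B =====
-- loop body of B: state = (dx, dy, posx, posy)
def taxiStepB (st : Int × Int × Int × Int) (move : String) : Int × Int × Int × Int :=
  let (dx, dy, posx, posy) := st
  if move = "R" then (dy, -dx, posx, posy)
  else if move = "L" then (-dy, dx, posx, posy)
  else if move = "F" then (dx, dy, posx + dx, posy + dy)
  else (dx, dy, posx, posy)

def taxi_zum_zum_alt (moves : List String) : Int × Int :=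
  let st := moves.foldl taxiStepB (0, 1, 0, 0)
  (st.2.2.1, st.2.2.2)

-- ===== PRECONDITION & SPEC =====
def Spec_taxi_zum_zum (moves : List String) (out : Int × Int) : Prop := out = taxi_zum_zum_alt moves
instance (moves : List String) (out : Int × Int) : Decidable (Spec_taxi_zum_zum moves out) := by unfold Spec_taxi_zum_zum; infer_instance

-- ===== CLAIM (what is proved, stated in full; the proofs are below) =====
def Claim_equal_taxi_zum_zum : Prop := ∀ (moves : List String), Dom_taxi_zum_zum moves → Spec_taxi_zum_zum moves (taxi_zum_zum moves)

-- ===== LEMMAS AND PROOFS =====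

-- the direction vector encoded by a heading residue
def taxiVec (r : Int) : Int × Int :=
  if r = 0 then (0, 1) else if r = 90 then (1, 0)
  else if r = 180 then (0, -1) else (-1, 0)

theorem taxi_mod_cases (h : Int) (hd : (90 : Int) ∣ h) :
    PySem.Int.mod h 360 = 0 ∨ PySem.Int.mod h 360 = 90 ∨
    PySem.Int.mod h 360 = 180 ∨ PySem.Int.mod h 360 = 270 := by
  rw [PySem.Int.mod_eq_emod_of_pos (by norm_num)]
  obtain ⟨k, rfl⟩ := hd
  omega

theorem taxi_loop_eq (moves : List String) :
    ∀ (h px py : Int), (90 : Int) ∣ h →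
    moves.foldl taxiStepB ((taxiVec (PySem.Int.mod h 360)).1, (taxiVec (PySem.Int.mod h 360)).2, px, py)
      = let st := moves.foldl taxiStepA (h, px, py)
        ((taxiVec (PySem.Int.mod st.1 360)).1, (taxiVec (PySem.Int.mod st.1 360)).2, st.2.1, st.2.2) := by
  induction moves with
  | nil => intro h px py _; rfl
  | cons m rest ih =>
    intro h px py hd
    simp only [List.foldl_cons]
    rcases taxi_mod_cases h hd with hm | hm | hm | hm <;>
    · by_cases hR : m = "R"
      · have := ih (h + 90) px py (by omega)
        rcases taxi_mod_cases (h + 90) (by omega) with hm' | hm' | hm' | hm' <;>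
          first
          | (rw [PySem.Int.mod_eq_emod_of_pos (by norm_num)] at hm hm'; omega)
          | (rw [hm'] at this
             simp only [taxiStepA, taxiStepB, hR, hm, hm', taxiVec]
             norm_num
             simpa [taxiVec] using this)
      · by_cases hL : m = "L"
        · have := ih (h - 90) px py (by omega)
          rcases taxi_mod_cases (h - 90) (by omega) with hm' | hm' | hm' | hm' <;>
            first
            | (rw [PySem.Int.mod_eq_emod_of_pos (by norm_num)] at hm hm'; omega)
            | (rw [hm'] at this
               simp only [taxiStepA, taxiStepB, hR, hL, taxiVec, hm, hm']
               norm_num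
               simpa [taxiVec] using this)
        · by_cases hF : m = "F"
          · simp only [taxiStepA, taxiStepB, hR, hL, hF, hm, taxiVec]
            norm_num
            first
            | (have := ih h px (py + 1) hd; rw [hm] at this; simpa [taxiVec] using this)
            | (have := ih h (px + 1) py hd; rw [hm] at this; simpa [taxiVec] using this)
            | (have := ih h px (py - 1) hd; rw [hm] at this
               simpa [taxiVec, sub_eq_add_neg] using this)
            | (have := ih h (px - 1) py hd; rw [hm] at this
               simpa [taxiVec, sub_eq_add_neg] using this)
          · simp only [taxiStepA, taxiStepB, hR, hL, hF, if_neg, not_false_iff]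
            exact ih h px py hd

-- ===== VERDICT (by name: the statement is the Claim_ definition above) =====
theorem taxi_zum_zum_spec : Claim_equal_taxi_zum_zum := by
  intro moves _
  unfold Spec_taxi_zum_zum taxi_zum_zum taxi_zum_zum_alt
  have := taxi_loop_eq moves 0 0 0 ⟨0, by norm_num⟩
  simp only [taxiVec] at this
  norm_num at this
  rw [this]
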